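-- pv_equiv track=rewrite | github.com/agusrosich/AURA | AURA VER 1.0.py | get_optimal_task_for_organ
-- ===== SOURCE A (Python) =====
-- def get_optimal_task_for_organ(organ: str, organ_to_tasks: dict[str, list[str]]) -> str:
--     """
--     Determina la task óptima para segmentar un órgano específico.
--
--     Prioridad:
--     1. 'total' si está disponible (más rápida, órganos principales)
--     2. Task más específica disponible
--     3. Primera task disponible
--     """
--     tasks = organ_to_tasks.get(organ, [])
--
--     if not tasks:
--         return 'total'  # fallback
--
--     # Priorizar 'total' si está disponible
--     if 'total' in tasks:
--         return 'total'
--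
--     # Preferir tasks específicas sobre genéricas
--     priority_order = ['body', 'liver_vessels', 'head_glands_cavities',
--                      'headneck_muscles', 'oculomotor_muscles']
--
--     for priority_task in priority_order:
--         if priority_task in tasks:
--             return priority_task
--
--     return tasks[0]
-- ===== SOURCE B (Python) =====
-- def get_optimal_task_for_organ(organ: str, organ_to_tasks: dict[str, list[str]]) -> str:
--     rank = {'total': 0, 'body': 1, 'liver_vessels': 2, 'head_glands_cavities': 3,
--             'headneck_muscles': 4, 'oculomotor_muscles': 5}
--     tasks = organ_to_tasks.get(organ, [])
--     if not tasks:
--         return 'total'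
--     return min(tasks, key=lambda t: rank.get(t, len(rank)))
-- ===== Notes on version B (the rewrite author's own statement) =====
-- stated objective: idiomatic
-- what changed: Replaces the membership check plus the scan over the hard-coded priority list with a single min() over the organ's own tasks keyed by a rank table (unknown tasks rank last), so one pass over tasks replaces repeated 'in' scans.
import Mathlib
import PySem

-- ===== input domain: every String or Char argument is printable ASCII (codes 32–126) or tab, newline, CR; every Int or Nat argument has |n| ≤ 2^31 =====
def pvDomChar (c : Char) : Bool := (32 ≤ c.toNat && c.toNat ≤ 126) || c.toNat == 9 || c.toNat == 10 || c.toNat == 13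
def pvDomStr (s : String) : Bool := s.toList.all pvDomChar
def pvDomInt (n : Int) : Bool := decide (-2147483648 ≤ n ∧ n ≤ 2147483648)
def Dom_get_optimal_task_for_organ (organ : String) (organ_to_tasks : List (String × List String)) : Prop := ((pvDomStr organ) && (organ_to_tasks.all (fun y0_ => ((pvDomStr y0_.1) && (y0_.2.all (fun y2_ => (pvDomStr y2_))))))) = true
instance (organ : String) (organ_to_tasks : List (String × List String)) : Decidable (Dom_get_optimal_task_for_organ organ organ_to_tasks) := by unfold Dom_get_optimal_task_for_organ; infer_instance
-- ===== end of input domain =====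

-- B replaces A's membership test plus scan over the hard-coded priority list by a single
-- min-by-rank pass over the organ's own tasks (idiomatic; same behaviour, one traversal of tasks).


-- ===== PORT A =====
def get_optimal_task_for_organ (organ : String) (organ_to_tasks : List (String × List String)) : String :=
  let tasks := (PySem.Dict.mk organ_to_tasks).getD organ []
  match tasks with
  | [] => "total"
  | t0 :: _ =>
    if "total" ∈ tasks then "total"
    else
      let priority_order := ["body", "liver_vessels", "head_glands_cavities",
                             "headneck_muscles", "oculomotor_muscles"]
      match priority_order.find? (fun p => decide (p ∈ tasks)) with
      | some p => p
      | none => t0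

-- ===== PORT B =====
-- rank.get(t, len(rank))
def pvRank (t : String) : Int :=
  (PySem.Dict.mk [("total", (0:Int)), ("body", 1), ("liver_vessels", 2),
                  ("head_glands_cavities", 3), ("headneck_muscles", 4),
                  ("oculomotor_muscles", 5)]).getD t 6

def get_optimal_task_for_organ_alt (organ : String) (organ_to_tasks : List (String × List String)) : String :=
  match (PySem.Dict.mk organ_to_tasks).getD organ [] with
  | [] => "total"
  | t0 :: rest => rest.foldl (fun b t => if pvRank t < pvRank b then t else b) t0

-- ===== PRECONDITION & SPEC =====
def Spec_get_optimal_task_for_organ (organ : String) (organ_to_tasks : List (String × List String)) (out : String) : Prop := out = get_optimal_task_for_organ_alt organ organ_to_tasks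
instance (organ : String) (organ_to_tasks : List (String × List String)) (out : String) : Decidable (Spec_get_optimal_task_for_organ organ organ_to_tasks out) := by unfold Spec_get_optimal_task_for_organ; infer_instance

-- ===== CLAIM (what is proved, stated in full; the proofs are below) =====
def Claim_equal_get_optimal_task_for_organ : Prop := ∀ (organ : String) (organ_to_tasks : List (String × List String)), Dom_get_optimal_task_for_organ organ organ_to_tasks → Spec_get_optimal_task_for_organ organ organ_to_tasks (get_optimal_task_for_organ organ organ_to_tasks)

-- ===== LEMMAS AND PROOFS =====
theorem pvRank_char (s : String) : pvRank s =
    if s = "total" then 0 else if s = "body" then 1 else if s = "liver_vessels" then 2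
    else if s = "head_glands_cavities" then 3 else if s = "headneck_muscles" then 4
    else if s = "oculomotor_muscles" then 5 else 6 := by
  unfold pvRank
  rw [PySem.Dict.getD_eq_get?_getD]
  simp only [PySem.Dict.get?_mk_cons, beq_iff_eq]
  by_cases h0 : s = "total" <;> by_cases h1 : s = "body" <;> by_cases h2 : s = "liver_vessels" <;>
    by_cases h3 : s = "head_glands_cavities" <;> by_cases h4 : s = "headneck_muscles" <;>
    by_cases h5 : s = "oculomotor_muscles" <;>
    simp_all [PySem.Dict.get?, eq_comm]

theorem pvRank_le (s : String) : pvRank s ≤ 6 := by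
  rw [pvRank_char]; split_ifs <;> omega

theorem pvRank_nonneg (s : String) : 0 ≤ pvRank s := by
  rw [pvRank_char]; split_ifs <;> omega

theorem pvRank_name (s : String) (k : Int)
    (hk : pvRank s = k) :
    (k = 0 → s = "total") ∧ (k = 1 → s = "body") ∧ (k = 2 → s = "liver_vessels") ∧
    (k = 3 → s = "head_glands_cavities") ∧ (k = 4 → s = "headneck_muscles") ∧
    (k = 5 → s = "oculomotor_muscles") := by
  rw [pvRank_char] at hk
  split_ifs at hk <;> subst hk <;>
    refine ⟨?_, ?_, ?_, ?_, ?_, ?_⟩ <;> intro h <;>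
      first | assumption | exact Eq.symm (by assumption) | omega

theorem pvRank_lt6 (s : String) (h : pvRank s < 6) :
    s = "total" ∨ s = "body" ∨ s = "liver_vessels" ∨ s = "head_glands_cavities" ∨
    s = "headneck_muscles" ∨ s = "oculomotor_muscles" := by
  rw [pvRank_char] at h
  split_ifs at h <;> first | omega | (subst_vars; tauto)

theorem pvFold_mem (ts : List String) (b : String) :
    ts.foldl (fun b t => if pvRank t < pvRank b then t else b) b = b ∨
    ts.foldl (fun b t => if pvRank t < pvRank b then t else b) b ∈ ts := by
  induction ts generalizing b with
  | nil => left; rfl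
  | cons a ts ih =>
    simp only [List.foldl_cons]
    by_cases hc : pvRank a < pvRank b
    · rw [if_pos hc]
      rcases ih a with h | h
      · right; rw [h]; exact List.mem_cons_self
      · right; exact List.mem_cons_of_mem _ h
    · rw [if_neg hc]
      rcases ih b with h | h
      · left; exact h
      · right; exact List.mem_cons_of_mem _ h

theorem pvFold_min (ts : List String) (b : String) :
    pvRank (ts.foldl (fun b t => if pvRank t < pvRank b then t else b) b) ≤ pvRank b ∧
    ∀ t ∈ ts, pvRank (ts.foldl (fun b t => if pvRank t < pvRank b then t else b) b) ≤ pvRank t := by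
  induction ts generalizing b with
  | nil => exact ⟨le_refl _, by simp⟩
  | cons a ts ih =>
    simp only [List.foldl_cons]
    obtain ⟨h1, h2⟩ := ih (if pvRank a < pvRank b then a else b)
    have hb : pvRank (if pvRank a < pvRank b then a else b) ≤ pvRank b := by
      split_ifs with hc <;> omega
    have ha : pvRank (if pvRank a < pvRank b then a else b) ≤ pvRank a := by
      split_ifs with hc <;> omega
    refine ⟨le_trans h1 hb, ?_⟩
    intro t ht
    rcases List.mem_cons.mp ht with rfl | ht
    · exact le_trans h1 ha
    · exact h2 t ht

theorem pvFold_id (ts : List String) (b : String)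
    (h : ∀ t ∈ ts, pvRank b ≤ pvRank t) :
    ts.foldl (fun b t => if pvRank t < pvRank b then t else b) b = b := by
  induction ts with
  | nil => rfl
  | cons a ts ih =>
    simp only [List.foldl_cons]
    have : ¬ pvRank a < pvRank b := not_lt.mpr (h a List.mem_cons_self)
    rw [if_neg this]
    exact ih (fun t ht => h t (List.mem_cons_of_mem _ ht))

-- ===== VERDICT (by name: the statement is the Claim_ definition above) =====
theorem get_optimal_task_for_organ_spec : Claim_equal_get_optimal_task_for_organ := by
  intro organ organ_to_tasks _
  unfold Spec_get_optimal_task_for_organ get_optimal_task_for_organ get_optimal_task_for_organ_alt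
  cases htasks : (PySem.Dict.mk organ_to_tasks).getD organ [] with
  | nil => rfl
  | cons t0 rest =>
    simp only []
    set m := rest.foldl (fun b t => if pvRank t < pvRank b then t else b) t0 with hm
    have hmem : m ∈ t0 :: rest := by
      rcases pvFold_mem rest t0 with h | h
      · rw [hm, h]; exact List.mem_cons_self
      · exact List.mem_cons_of_mem _ h
    obtain ⟨hmin0, hmin⟩ := pvFold_min rest t0
    have hminAll : ∀ t ∈ t0 :: rest, pvRank m ≤ pvRank t := by
      intro t ht
      rcases List.mem_cons.mp ht with rfl | ht
      · exact hmin0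
      · exact hmin t ht
    by_cases h0 : "total" ∈ t0 :: rest
    · have hr : pvRank m = 0 := by
        have := hminAll _ h0
        have h1 := pvRank_nonneg m
        have h2 : pvRank "total" = 0 := by decide
        omega
      have : m = "total" := (pvRank_name m 0 hr).1 rfl
      simp [h0, this]
    · rw [if_neg h0]
      by_cases h1 : "body" ∈ t0 :: rest
      · have hr : pvRank m = 1 := by
          have := hminAll _ h1
          have hb : pvRank "body" = 1 := by decide
          have hn := pvRank_nonneg m
          have : pvRank m ≠ 0 := fun hz => h0 (((pvRank_name m 0 hz).1 rfl) ▸ hmem)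
          omega
        have hmb : m = "body" := (pvRank_name m 1 hr).2.1 rfl
        simp [List.find?, h1, hmb]
      · by_cases h2 : "liver_vessels" ∈ t0 :: rest
        · have hr : pvRank m = 2 := by
            have := hminAll _ h2
            have hb : pvRank "liver_vessels" = 2 := by decide
            have hn := pvRank_nonneg m
            have : pvRank m ≠ 0 := fun hz => h0 (((pvRank_name m 0 hz).1 rfl) ▸ hmem)
            have : pvRank m ≠ 1 := fun hz => h1 (((pvRank_name m 1 hz).2.1 rfl) ▸ hmem)
            omega
          have hmb : m = "liver_vessels" := (pvRank_name m 2 hr).2.2.1 rfl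
          simp [List.find?, h1, h2, hmb]
        · by_cases h3 : "head_glands_cavities" ∈ t0 :: rest
          · have hr : pvRank m = 3 := by
              have := hminAll _ h3
              have hb : pvRank "head_glands_cavities" = 3 := by decide
              have hn := pvRank_nonneg m
              have : pvRank m ≠ 0 := fun hz => h0 (((pvRank_name m 0 hz).1 rfl) ▸ hmem)
              have : pvRank m ≠ 1 := fun hz => h1 (((pvRank_name m 1 hz).2.1 rfl) ▸ hmem)
              have : pvRank m ≠ 2 := fun hz => h2 (((pvRank_name m 2 hz).2.2.1 rfl) ▸ hmem)
              omega
            have hmb : m = "head_glands_cavities" := (pvRank_name m 3 hr).2.2.2.1 rfl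
            simp [List.find?, h1, h2, h3, hmb]
          · by_cases h4 : "headneck_muscles" ∈ t0 :: rest
            · have hr : pvRank m = 4 := by
                have := hminAll _ h4
                have hb : pvRank "headneck_muscles" = 4 := by decide
                have hn := pvRank_nonneg m
                have : pvRank m ≠ 0 := fun hz => h0 (((pvRank_name m 0 hz).1 rfl) ▸ hmem)
                have : pvRank m ≠ 1 := fun hz => h1 (((pvRank_name m 1 hz).2.1 rfl) ▸ hmem)
                have : pvRank m ≠ 2 := fun hz => h2 (((pvRank_name m 2 hz).2.2.1 rfl) ▸ hmem)
                have : pvRank m ≠ 3 := fun hz => h3 (((pvRank_name m 3 hz).2.2.2.1 rfl) ▸ hmem)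
                omega
              have hmb : m = "headneck_muscles" := (pvRank_name m 4 hr).2.2.2.2.1 rfl
              simp [List.find?, h1, h2, h3, h4, hmb]
            · by_cases h5 : "oculomotor_muscles" ∈ t0 :: rest
              · have hr : pvRank m = 5 := by
                  have := hminAll _ h5
                  have hb : pvRank "oculomotor_muscles" = 5 := by decide
                  have hn := pvRank_nonneg m
                  have : pvRank m ≠ 0 := fun hz => h0 (((pvRank_name m 0 hz).1 rfl) ▸ hmem)
                  have : pvRank m ≠ 1 := fun hz => h1 (((pvRank_name m 1 hz).2.1 rfl) ▸ hmem)
                  have : pvRank m ≠ 2 := fun hz => h2 (((pvRank_name m 2 hz).2.2.1 rfl) ▸ hmem)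
                  have : pvRank m ≠ 3 := fun hz => h3 (((pvRank_name m 3 hz).2.2.2.1 rfl) ▸ hmem)
                  have : pvRank m ≠ 4 := fun hz => h4 (((pvRank_name m 4 hz).2.2.2.2.1 rfl) ▸ hmem)
                  omega
                have hmb : m = "oculomotor_muscles" := (pvRank_name m 5 hr).2.2.2.2.2 rfl
                simp [List.find?, h1, h2, h3, h4, h5, hmb]
              · -- no ranked task present: every member has rank 6, the fold keeps t0
                have hall : ∀ t ∈ t0 :: rest, pvRank t = 6 := by
                  intro t ht
                  have hle := pvRank_le t
                  by_contra hne
                  rcases pvRank_lt6 t (lt_of_le_of_ne hle hne) with rfl|rfl|rfl|rfl|rfl|rfl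
                  · exact h0 ht
                  · exact h1 ht
                  · exact h2 ht
                  · exact h3 ht
                  · exact h4 ht
                  · exact h5 ht
                have : m = t0 := by
                  rw [hm]
                  apply pvFold_id
                  intro t ht
                  rw [hall t (List.mem_cons_of_mem _ ht)]
                  exact pvRank_le t0
                simp [List.find?, h1, h2, h3, h4, h5, this]
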